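-- pv_equiv track=rewrite | github.com/csm5099/Algorithm_Pratice | week03/03_03_algorithm.py | solution
-- ===== SOURCE A (Python) =====
-- def solution(board, moves):
--     answer = 0
--     result=[]
--     new_board=list(map(list, zip(*board)))
--
--     for i in range(len(new_board)):
--         new_board[i].reverse()
--         new_board[i] = [j for j in new_board[i] if j != 0]
--
--     for i in moves:
--         if new_board[i-1] == []:
--             continue
--         temp=new_board[i-1]
--         result.append(new_board[i-1].pop())
--         if result[len(result)-2] ==result[len(result)-1] and len(result)>=2:
--             result.pop()
--             result.pop()
--             answer+=2
--     return answer
-- ===== SOURCE B (Python) =====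
-- def solution(board, moves):
--     # Per-column pointer into the unmutated board; explicit basket stack.
--     rows = len(board)
--     cols = len(board[0]) if board else 0
--     tops = [0] * cols
--     stack = []
--     answer = 0
--     for m in moves:
--         c = m - 1
--         r = tops[c]
--         while r < rows and board[r][c] == 0:
--             r += 1
--         if r == rows:
--             tops[c] = r
--             continue
--         tops[c] = r + 1
--         doll = board[r][c]
--         if stack and stack[-1] == doll:
--             stack.pop()
--             answer += 2
--         else:
--             stack.append(doll)
--     return answer
-- ===== Notes on version B (the rewrite author's own statement) =====
-- stated objective: idiomatic
-- what changed: B replaces A's transpose/reverse/filter preprocessing and destructive column pops with per-column pointers (tops) scanning the unmutated board downward and an explicit basket stack, so no transposed copy of the board is ever built.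
-- outside the precondition, e.g. on solution([[1, 3], [3]], [0, 0]): A returns 0, B returns 2
import Mathlib
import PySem

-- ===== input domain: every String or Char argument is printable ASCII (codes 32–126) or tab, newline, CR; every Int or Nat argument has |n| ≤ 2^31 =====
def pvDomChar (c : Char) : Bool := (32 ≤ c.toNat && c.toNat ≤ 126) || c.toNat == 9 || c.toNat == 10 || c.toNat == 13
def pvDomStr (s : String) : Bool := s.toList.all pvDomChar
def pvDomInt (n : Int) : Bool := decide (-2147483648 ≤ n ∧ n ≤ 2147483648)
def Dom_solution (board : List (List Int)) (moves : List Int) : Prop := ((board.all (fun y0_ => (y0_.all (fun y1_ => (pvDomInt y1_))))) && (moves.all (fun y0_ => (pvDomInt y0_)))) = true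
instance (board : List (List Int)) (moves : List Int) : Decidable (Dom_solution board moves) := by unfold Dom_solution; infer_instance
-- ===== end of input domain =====

-- B keeps per-column pointers into the unmutated board and an explicit basket stack
-- instead of A's transpose/reverse/filter preprocessing; equivalence is about the
-- return value (neither program mutates its arguments observably from outside).

-- ===== PORT A =====

-- zip(*board): list of columns, truncated to the shortest row
def pvZipStar (rows : List (List Int)) : List (List Int) :=
  match rows with
  | [] => []
  | r :: rs =>
    let n := rs.foldl (fun a x => min a x.length) r.length
    (List.range n).map (fun j => (r :: rs).map (fun row => row.getD j 0))

-- lst[i] = v with Python index semantics (no-op where Python would raise)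
def pvSetIdx {α : Type} (l : List α) (i : Int) (v : α) : List α :=
  let j := if i < 0 then i + l.length else i
  if 0 ≤ j ∧ j < (l.length : Int) then l.set j.toNat v else l

def aLoop : List Int → List (List Int) → List Int → Int → Int
  | [], _, _, answer => answer
  | i :: ms, nb, result, answer =>
    match PySem.List.pyGet? nb (i - 1) with
    | none => aLoop ms nb result answer      -- Python raises IndexError here (outside Pre_)
    | some col =>
      if col = [] then aLoop ms nb result answer
      else
        match col.getLast? with
        | none => aLoop ms nb result answer  -- unreachable: col ≠ []
        | some d =>
          let nb' := pvSetIdx nb (i - 1) col.dropLast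
          let result' := result ++ [d]
          if PySem.List.pyGet? result' ((result'.length : Int) - 2)
               = PySem.List.pyGet? result' ((result'.length : Int) - 1)
             ∧ (2:Int) ≤ (result'.length : Int)
          then aLoop ms nb' result'.dropLast.dropLast (answer + 2)
          else aLoop ms nb' result' answer

def solution (board : List (List Int)) (moves : List Int) : Int :=
  let new_board := (pvZipStar board).map (fun c => c.reverse.filter (fun x => decide (x ≠ 0)))
  aLoop moves new_board [] 0

-- ===== PORT B =====

-- board[r][c] with Python index semantics (0 where Python would raise, outside Pre_)
def bCell (board : List (List Int)) (r : Int) (c : Int) : Int :=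
  match PySem.List.pyGet? board r with
  | none => 0
  | some row => (PySem.List.pyGet? row c).getD 0

-- while r < rows and board[r][c] == 0: r += 1   (fuel = rows - r)
def bFind (board : List (List Int)) (c : Int) : Nat → Int → Int
  | 0, r => r
  | fuel + 1, r => if bCell board r c = 0 then bFind board c fuel (r + 1) else r

def bLoop (board : List (List Int)) : List Int → List Int → List Int → Int → Int
  | [], _, _, answer => answer
  | m :: ms, tops, stack, answer =>
    let c := m - 1
    match PySem.List.pyGet? tops c with
    | none => bLoop board ms tops stack answer   -- Python raises IndexError here (outside Pre_)
    | some r0 =>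
      let rows : Int := board.length
      let r := bFind board c (rows - r0).toNat r0
      if r = rows then bLoop board ms (pvSetIdx tops c r) stack answer
      else
        let d := bCell board r c
        let tops' := pvSetIdx tops c (r + 1)
        match stack with
        | [] => bLoop board ms tops' [d] answer
        | t :: rest =>
          if t = d then bLoop board ms tops' rest (answer + 2)
          else bLoop board ms tops' (d :: t :: rest) answer

def solution_alt (board : List (List Int)) (moves : List Int) : Int :=
  let cols : Nat := match board with | [] => 0 | r :: _ => r.length
  bLoop board moves (List.replicate cols (0 : Int)) [] 0

-- ===== PRECONDITION & SPEC =====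

def pvCols (board : List (List Int)) : Nat :=
  match board with | [] => 0 | r :: _ => r.length

-- Pre_ restricts to the task's natural domain: rectangular boards and moves whose
-- column index exists.  It excludes non-rectangular boards, on which zip's silent
-- truncation of the longer rows is an artefact of A's implementation, and moves
-- outside that range, on which A raises IndexError.
def Pre_solution (board : List (List Int)) (moves : List Int) : Prop :=
  (∀ row ∈ board, row.length = pvCols board) ∧
  (∀ m ∈ moves, 1 - (pvCols board : Int) ≤ m ∧ m ≤ (pvCols board : Int))

instance (board : List (List Int)) (moves : List Int) : Decidable (Pre_solution board moves) := by
  unfold Pre_solution; infer_instance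

def pvWitness_solution : List (List Int) × List Int := ([[1, 0], [2, 3]], [1, 2, 2])

def Spec_solution (board : List (List Int)) (moves : List Int) (out : Int) : Prop := out = solution_alt board moves
instance (board : List (List Int)) (moves : List Int) (out : Int) : Decidable (Spec_solution board moves out) := by unfold Spec_solution; infer_instance

-- ===== CLAIM (what is proved, stated in full; the proofs are below) =====
def Claim_equal_solution : Prop := ∀ (board : List (List Int)) (moves : List Int), Dom_solution board moves → Pre_solution board moves → Spec_solution board moves (solution board moves)

-- ===== LEMMAS AND PROOFS =====

-- the j-th column of the board, as A's zip builds it (rows shorter than j never occur inside Pre_)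
def colCells (board : List (List Int)) (j : Nat) : List Int :=
  board.map (fun row => row.getD j 0)

-- normalized (Python) column index of move m
def pvJ (cols : Nat) (m : Int) : Nat := (if m - 1 < 0 then m - 1 + cols else m - 1).toNat

theorem pvJ_lt (cols : Nat) (m : Int) (h1 : 1 - (cols : Int) ≤ m) (h2 : m ≤ cols) :
    pvJ cols m < cols := by
  unfold pvJ; split <;> omega

theorem getElem?_eq_some_getD {α : Type} (l : List α) (j : Nat) (d : α) (h : j < l.length) :
    l[j]? = some (l.getD j d) := by
  rw [List.getElem?_eq_getElem h, List.getD_eq_getElem l d h]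

theorem pyGet?_norm {α : Type} (l : List α) (cols : Nat) (m : Int) (hl : l.length = cols)
    (h1 : 1 - (cols : Int) ≤ m) (h2 : m ≤ cols) :
    PySem.List.pyGet? l (m - 1) = l[pvJ cols m]? := by
  rcases Int.lt_or_le m 1 with hm | hm
  · rw [PySem.List.pyGet?_neg l (by omega) (by omega : -(l.length : Int) ≤ m - 1)]
    congr 1; unfold pvJ; split <;> omega
  · rw [PySem.List.pyGet?_of_nonneg l (by omega)]
    congr 1; unfold pvJ; split <;> omega

theorem pvSetIdx_norm {α : Type} (l : List α) (cols : Nat) (m : Int) (hl : l.length = cols)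
    (h1 : 1 - (cols : Int) ≤ m) (h2 : m ≤ cols) (v : α) :
    pvSetIdx l (m - 1) v = l.set (pvJ cols m) v := by
  have hjl := pvJ_lt cols m h1 h2
  simp only [pvSetIdx]
  have hcond : (if m - 1 < 0 then m - 1 + (l.length : Int) else m - 1) = ((pvJ cols m : Nat) : Int) := by
    unfold pvJ; split <;> omega
  rw [hcond, if_pos ⟨Int.natCast_nonneg _, by omega⟩, Int.toNat_natCast]

theorem getD_set {α : Type} (l : List α) (i j : Nat) (v d : α) (hj : j < l.length) :
    (l.set i v).getD j d = if i = j then v else l.getD j d := by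
  rw [List.getD_eq_getElem _ d (by rw [List.length_set]; exact hj), List.getElem_set]
  split
  · rfl
  · rw [List.getD_eq_getElem l d hj]

theorem bCell_eq (board : List (List Int)) (cols : Nat)
    (hrect : ∀ row ∈ board, row.length = cols) (m : Int)
    (h1 : 1 - (cols : Int) ≤ m) (h2 : m ≤ cols) (t : Nat) (ht : t < board.length) :
    bCell board (t : Int) (m - 1) = (colCells board (pvJ cols m)).getD t 0 := by
  have hrow : board[t].length = cols := hrect _ (List.getElem_mem ht)
  have hj : pvJ cols m < board[t].length := by rw [hrow]; exact pvJ_lt cols m h1 h2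
  unfold bCell
  rw [PySem.List.pyGet?_of_nonneg board (by omega), Int.toNat_natCast,
    List.getElem?_eq_getElem ht]
  show (PySem.List.pyGet? board[t] (m - 1)).getD 0 = (colCells board (pvJ cols m)).getD t 0
  rw [pyGet?_norm board[t] cols m hrow h1 h2, List.getElem?_eq_getElem hj]
  have htc : t < (colCells board (pvJ cols m)).length := by
    rw [colCells, List.length_map]; exact ht
  rw [List.getD_eq_getElem _ 0 htc]
  simp only [colCells, List.getElem_map]
  rw [List.getD_eq_getElem _ 0 hj]
  rfl

theorem bFind_eq (board : List (List Int)) (cols : Nat)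
    (hrect : ∀ row ∈ board, row.length = cols) (m : Int)
    (h1 : 1 - (cols : Int) ≤ m) (h2 : m ≤ cols) :
    ∀ (fuel t : Nat), t + fuel = board.length →
      bFind board (m - 1) fuel (t : Int) =
        ((t + (((colCells board (pvJ cols m)).drop t).takeWhile (fun x => x == 0)).length : Nat) : Int) := by
  intro fuel
  induction fuel with
  | zero =>
    intro t htl
    have hlen : (colCells board (pvJ cols m)).length = board.length := by
      rw [colCells, List.length_map]
    have hnil : (colCells board (pvJ cols m)).drop t = [] := by
      apply List.drop_eq_nil_of_le; omega
    simp [bFind, hnil]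
  | succ n ih =>
    intro t htl
    have ht : t < board.length := by omega
    have htc : t < (colCells board (pvJ cols m)).length := by
      rw [colCells, List.length_map]; exact ht
    have hdrop : (colCells board (pvJ cols m)).drop t =
        (colCells board (pvJ cols m)).getD t 0 :: (colCells board (pvJ cols m)).drop (t + 1) := by
      rw [List.getD_eq_getElem _ 0 htc]
      exact List.drop_eq_getElem_cons htc
    have hcell := bCell_eq board cols hrect m h1 h2 t ht
    by_cases hz : (colCells board (pvJ cols m)).getD t 0 = 0
    · rw [bFind, if_pos (by rw [hcell]; exact hz)]
      have hcast : (t : Int) + 1 = ((t + 1 : Nat) : Int) := by push_cast; ring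
      rw [hcast, ih (t + 1) (by omega), hdrop]
      simp only [List.takeWhile_cons]
      rw [if_pos (by simpa using hz)]
      simp only [List.length_cons]
      push_cast; ring
    · rw [bFind, if_neg (by rw [hcell]; exact hz), hdrop]
      simp only [List.takeWhile_cons]
      rw [if_neg (by simpa using hz)]
      simp

theorem dropWhile_head_false {α : Type} {p : α → Bool} :
    ∀ (l : List α) {d : α} {r : List α}, l.dropWhile p = d :: r → p d = false := by
  intro l
  induction l with
  | nil => intro d r h; simp [List.dropWhile] at h
  | cons a t ih =>
    intro d r h
    rw [List.dropWhile_cons] at h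
    by_cases hp : p a
    · rw [if_pos hp] at h; exact ih h
    · rw [if_neg hp] at h
      obtain ⟨rfl, -⟩ := List.cons.inj h
      simpa using hp

theorem filter_eq_filter_dropWhile (l : List Int) :
    l.filter (fun x => decide (x ≠ 0)) =
      (l.dropWhile (fun x => x == 0)).filter (fun x => decide (x ≠ 0)) := by
  conv_lhs => rw [← List.takeWhile_append_dropWhile (p := fun x : Int => x == 0) (l := l)]
  rw [List.filter_append]
  have hnil : (l.takeWhile (fun x : Int => x == 0)).filter (fun x => decide (x ≠ 0)) = [] := by
    rw [List.filter_eq_nil_iff]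
    intro a ha
    have := List.mem_takeWhile_imp ha
    simp_all
  rw [hnil, List.nil_append]

-- one processed move preserves the simulation; the whole loops agree
theorem sim (board : List (List Int)) (cols : Nat)
    (hrect : ∀ row ∈ board, row.length = cols) :
    ∀ (moves : List Int) (nb : List (List Int)) (tops : List Int) (stack : List Int) (ans : Int),
      (∀ m ∈ moves, 1 - (cols : Int) ≤ m ∧ m ≤ cols) →
      nb.length = cols → tops.length = cols →
      (∀ j, j < cols → ∃ t : Nat, t ≤ board.length ∧ tops.getD j 0 = (t : Int) ∧
        nb.getD j [] = (((colCells board j).drop t).filter (fun x => decide (x ≠ 0))).reverse) →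
      aLoop moves nb stack.reverse ans = bLoop board moves tops stack ans := by
  intro moves
  induction moves with
  | nil => intro nb tops stack ans _ _ _ _; rfl
  | cons m ms ih =>
    intro nb tops stack ans hbnd hnb htops hinv
    obtain ⟨h1, h2⟩ := hbnd m (List.mem_cons_self ..)
    have hbnd' : ∀ m' ∈ ms, 1 - (cols : Int) ≤ m' ∧ m' ≤ (cols : Int) :=
      fun m' hm' => hbnd m' (List.mem_cons_of_mem _ hm')
    have hj : pvJ cols m < cols := pvJ_lt cols m h1 h2
    obtain ⟨t, htle, htop, hnbj⟩ := hinv (pvJ cols m) hj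
    have hglen : (colCells board (pvJ cols m)).length = board.length := by
      rw [colCells, List.length_map]
    -- both sides look up the same column
    have hA : PySem.List.pyGet? nb (m - 1) = some (nb.getD (pvJ cols m) []) := by
      rw [pyGet?_norm nb cols m hnb h1 h2, getElem?_eq_some_getD _ _ [] (by omega)]
    have hB : PySem.List.pyGet? tops (m - 1) = some ((t : Nat) : Int) := by
      rw [pyGet?_norm tops cols m htops h1 h2, getElem?_eq_some_getD _ _ 0 (by omega), htop]
    have hfuel : (((board.length : Int)) - (t : Int)).toNat = board.length - t := by omega
    have hfind := bFind_eq board cols hrect m h1 h2 (board.length - t) t (by omega)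
    set suf := (colCells board (pvJ cols m)).drop t with hsuf
    have hsuflen : suf.length = board.length - t := by
      rw [hsuf, List.length_drop, hglen]
    rw [aLoop, bLoop, hA, hB]
    simp only [hfuel, hfind]
    rcases hd : suf.dropWhile (fun x => x == 0) with _ | ⟨d, rest⟩
    · -- the column holds no doll any more: both sides skip
      have hall : ∀ x ∈ suf, x = 0 := by
        intro x hx
        have := List.dropWhile_eq_nil_iff.mp hd x hx
        simpa using this
      have htw : suf.takeWhile (fun x => x == 0) = suf :=
        List.takeWhile_eq_self_iff.mpr (fun x hx => by simpa using hall x hx)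
      have hfilter : suf.filter (fun x => decide (x ≠ 0)) = [] :=
        List.filter_eq_nil_iff.mpr (fun a ha => by simp [hall a ha])
      have hcolnil : nb.getD (pvJ cols m) [] = [] := by
        rw [hnbj, hfilter, List.reverse_nil]
      rw [if_pos hcolnil, htw, hsuflen]
      have hr : ((t + (board.length - t) : Nat) : Int) = (board.length : Int) := by omega
      rw [hr, if_pos rfl, pvSetIdx_norm tops cols m htops h1 h2]
      apply ih _ _ _ _ hbnd' hnb (by rw [List.length_set]; exact htops)
      intro j' hj'
      by_cases hjj : j' = pvJ cols m
      · subst hjj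
        refine ⟨board.length, le_refl _, ?_, ?_⟩
        · rw [getD_set _ _ _ _ _ (by omega), if_pos rfl]
        · have hdropnil : (colCells board (pvJ cols m)).drop board.length = [] :=
            List.drop_eq_nil_of_le (by omega)
          rw [hnbj, hfilter, hdropnil]
          simp
      · obtain ⟨t', h'⟩ := hinv j' hj'
        exact ⟨t', h'.1, by rw [getD_set _ _ _ _ _ (by omega), if_neg (fun h => hjj h.symm)]; exact h'.2.1, h'.2.2⟩
    · -- a doll d is found
      have hdn : (d == (0 : Int)) = false := dropWhile_head_false (p := fun x : Int => x == 0) suf hd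
      have hd0 : d ≠ 0 := by simpa using hdn
      set k := (suf.takeWhile (fun x => x == 0)).length with hk
      have hsplit : suf = suf.takeWhile (fun x => x == 0) ++ d :: rest := by
        conv_lhs => rw [← List.takeWhile_append_dropWhile (p := fun x : Int => x == 0) (l := suf)]
        rw [hd]
      have hklen : k + 1 + rest.length = suf.length := by
        conv_rhs => rw [hsplit]
        simp [hk]; omega
      have hkrows : t + k < board.length := by omega
      -- A's column is nonempty, its popped doll is d
      have hfilter : suf.filter (fun x => decide (x ≠ 0)) = d :: rest.filter (fun x => decide (x ≠ 0)) := by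
        rw [filter_eq_filter_dropWhile, hd, List.filter_cons, if_pos (by simpa using hd0)]
      have hcol : nb.getD (pvJ cols m) [] =
          (rest.filter (fun x => decide (x ≠ 0))).reverse ++ [d] := by
        rw [hnbj, hfilter, List.reverse_cons]
      rw [if_neg (by rw [hcol]; simp)]
      rw [hcol, List.getLast?_concat, List.dropLast_concat]
      -- B does not hit the bottom of the column
      have hne : ((t + k : Nat) : Int) ≠ (board.length : Int) := by
        push_cast; omega
      rw [if_neg hne]
      -- the doll B pops is d too
      have hdropk : suf.drop k = d :: rest := by
        conv_lhs => rw [hsplit]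
        exact List.drop_left ..
      have hcellk : bCell board ((t + k : Nat) : Int) (m - 1) = d := by
        rw [bCell_eq board cols hrect m h1 h2 (t + k) hkrows]
        have hlt : t + k < (colCells board (pvJ cols m)).length := by omega
        have e1 : (colCells board (pvJ cols m))[t + k]? = suf[k]? := by
          rw [hsuf]; exact (List.getElem?_drop).symm
        have e2 : suf[k]? = some d := by
          have h0 : (suf.drop k)[0]? = suf[k + 0]? := List.getElem?_drop
          rw [hdropk] at h0
          simpa using h0.symm
        rw [List.getD_eq_getElem _ 0 hlt]
        have hsome := e1.trans e2
        rw [List.getElem?_eq_getElem hlt] at hsome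
        exact Option.some.inj hsome
      rw [hcellk]
      -- updated column invariant (shared by all basket branches)
      have hset_inv : ∀ (v : List Int), v = (rest.filter (fun x => decide (x ≠ 0))).reverse →
          ∀ j', j' < cols → ∃ t' : Nat, t' ≤ board.length ∧
            (pvSetIdx tops (m - 1) (((t + k : Nat) : Int) + 1)).getD j' 0 = (t' : Int) ∧
            (pvSetIdx nb (m - 1) v).getD j' [] =
              (((colCells board j').drop t').filter (fun x => decide (x ≠ 0))).reverse := by
        intro v hv j' hj'
        rw [pvSetIdx_norm tops cols m htops h1 h2, pvSetIdx_norm nb cols m hnb h1 h2]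
        by_cases hjj : j' = pvJ cols m
        · subst hjj
          refine ⟨t + k + 1, by omega, ?_, ?_⟩
          · rw [getD_set _ _ _ _ _ (by omega), if_pos rfl]; push_cast; ring
          · rw [getD_set _ _ _ _ _ (by omega), if_pos rfl, hv]
            have : (colCells board (pvJ cols m)).drop (t + k + 1) = rest := by
              have h1' : (colCells board (pvJ cols m)).drop (t + (k + 1)) = suf.drop (k + 1) := by
                rw [hsuf, List.drop_drop]
              have h2' : suf.drop (k + 1) = rest := by
                rw [hsplit]
                have : k + 1 = (suf.takeWhile (fun x => x == 0)).length + 1 := by rw [hk]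
                rw [this, ← List.drop_drop]
                rw [List.drop_left]
                simp
              rw [show t + k + 1 = t + (k + 1) by ring, h1', h2']
            rw [this]
        · obtain ⟨t', h'⟩ := hinv j' hj'
          refine ⟨t', h'.1, ?_, ?_⟩
          · rw [getD_set _ _ _ _ _ (by omega), if_neg (fun h => hjj h.symm)]; exact h'.2.1
          · rw [getD_set _ _ _ _ _ (by omega), if_neg (fun h => hjj h.symm)]; exact h'.2.2
      have hsetlen_nb : ∀ (v : List Int), (pvSetIdx nb (m - 1) v).length = cols := by
        intro v; rw [pvSetIdx_norm nb cols m hnb h1 h2, List.length_set]; exact hnb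
      have hsetlen_tops : ∀ (v : Int), (pvSetIdx tops (m - 1) v).length = cols := by
        intro v; rw [pvSetIdx_norm tops cols m htops h1 h2, List.length_set]; exact htops
      -- basket step
      rcases stack with _ | ⟨tp, rest'⟩
      · -- empty basket: push
        simp only [List.reverse_nil, List.nil_append]
        rw [if_neg (by rintro ⟨-, hlen2⟩; simp at hlen2)]
        have := ih (pvSetIdx nb (m - 1) (rest.filter (fun x => decide (x ≠ 0))).reverse)
          (pvSetIdx tops (m - 1) (((t + k : Nat) : Int) + 1)) [d] ans hbnd'
          (hsetlen_nb _) (hsetlen_tops _) (hset_inv _ rfl)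
        simpa using this
      · simp only []
        have hres : (tp :: rest').reverse ++ [d] = rest'.reverse ++ [tp, d] := by
          rw [List.reverse_cons, List.append_assoc]; rfl
        have hlen : ((tp :: rest').reverse ++ [d]).length = rest'.length + 2 := by
          simp
        have hget1 : PySem.List.pyGet? ((tp :: rest').reverse ++ [d])
            ((((tp :: rest').reverse ++ [d]).length : Int) - 1) = some d := by
          rw [hlen, PySem.List.pyGet?_of_nonneg _ (by omega),
            show (((rest'.length + 2 : Nat) : Int) - 1).toNat = rest'.length + 1 by omega, hres]
          rw [List.getElem?_append_right (by simp)]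
          simp
        have hget2 : PySem.List.pyGet? ((tp :: rest').reverse ++ [d])
            ((((tp :: rest').reverse ++ [d]).length : Int) - 2) = some tp := by
          rw [hlen, PySem.List.pyGet?_of_nonneg _ (by omega),
            show (((rest'.length + 2 : Nat) : Int) - 2).toNat = rest'.length by omega, hres]
          rw [List.getElem?_append_right (by simp)]
          simp
        by_cases htpd : tp = d
        · rw [if_pos ⟨by rw [hget1, hget2, htpd], by rw [hlen]; push_cast; omega⟩, if_pos htpd]
          rw [List.dropLast_concat, List.reverse_cons, List.dropLast_concat]
          exact ih _ _ rest' (ans + 2) hbnd' (hsetlen_nb _) (hsetlen_tops _) (hset_inv _ rfl)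
        · rw [if_neg (by rintro ⟨heq, -⟩; rw [hget1, hget2] at heq; exact htpd (Option.some.inj heq)),
            if_neg htpd]
          have := ih (pvSetIdx nb (m - 1) (rest.filter (fun x => decide (x ≠ 0))).reverse)
            (pvSetIdx tops (m - 1) (((t + k : Nat) : Int) + 1)) (d :: tp :: rest') ans hbnd'
            (hsetlen_nb _) (hsetlen_tops _) (hset_inv _ rfl)
          rw [List.reverse_cons, List.reverse_cons] at this
          rw [List.reverse_cons]
          exact this

-- the initial transposed board
theorem foldl_min_const (cols : Nat) :
    ∀ (rs : List (List Int)), (∀ x ∈ rs, x.length = cols) →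
      rs.foldl (fun a x => min a x.length) cols = cols := by
  intro rs
  induction rs with
  | nil => intro _; rfl
  | cons r t ih =>
    intro h
    simp only [List.foldl_cons]
    rw [h r (List.mem_cons_self ..), min_self]
    exact ih (fun x hx => h x (List.mem_cons_of_mem _ hx))

theorem pvZipStar_rect (board : List (List Int)) (cols : Nat) (hcols : pvCols board = cols)
    (hrect : ∀ row ∈ board, row.length = cols) :
    pvZipStar board = (List.range cols).map (fun j => colCells board j) := by
  cases board with
  | nil =>
    have : cols = 0 := by rw [← hcols]; rfl
    subst this; rfl
  | cons r rs =>
    have hr : r.length = cols := hrect r (List.mem_cons_self ..)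
    have hn : rs.foldl (fun a x => min a x.length) r.length = cols := by
      rw [hr]
      exact foldl_min_const cols rs (fun x hx => hrect x (List.mem_cons_of_mem _ hx))
    simp only [pvZipStar, hn]
    rfl

theorem init_inv (board : List (List Int)) (cols : Nat) (hcols : pvCols board = cols)
    (hrect : ∀ row ∈ board, row.length = cols) (j : Nat) (hj : j < cols) :
    ((pvZipStar board).map (fun c => c.reverse.filter (fun x => decide (x ≠ 0)))).getD j [] =
      (((colCells board j).drop 0).filter (fun x => decide (x ≠ 0))).reverse := by
  rw [pvZipStar_rect board cols hcols hrect, List.map_map]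
  have hlen : j < ((List.range cols).map
      ((fun c => c.reverse.filter (fun x => decide (x ≠ 0))) ∘ fun j => colCells board j)).length := by
    simp [hj]
  rw [List.getD_eq_getElem _ [] hlen, List.getElem_map, List.getElem_range]
  simp [List.filter_reverse]

-- ===== VERDICT (by name: the statement is the Claim_ definition above) =====
theorem solution_spec : Claim_equal_solution := by
  intro board moves _ hpre
  obtain ⟨hrect, hbnd⟩ := hpre
  unfold Spec_solution
  show solution board moves = solution_alt board moves
  have hgoal : solution board moves = aLoop moves
      ((pvZipStar board).map (fun c => c.reverse.filter (fun x => decide (x ≠ 0)))) [] 0 := rfl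
  have hgoal' : solution_alt board moves =
      bLoop board moves (List.replicate (pvCols board) (0 : Int)) [] 0 := by
    cases board <;> rfl
  rw [hgoal, hgoal']
  have hstart := sim board (pvCols board) hrect moves
    ((pvZipStar board).map (fun c => c.reverse.filter (fun x => decide (x ≠ 0))))
    (List.replicate (pvCols board) (0 : Int)) [] 0 hbnd
    (by rw [List.length_map, pvZipStar_rect board _ rfl hrect, List.length_map, List.length_range])
    (List.length_replicate)
    (by
      intro j hj
      refine ⟨0, Nat.zero_le _, ?_, init_inv board _ rfl hrect j hj⟩
      rw [Nat.cast_zero, List.getD_eq_getElem _ 0 (by rw [List.length_replicate]; exact hj),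
        List.getElem_replicate])
  simpa using hstart
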